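-- pv_equiv track=rewrite | github.com/theLaborInVain/kdm-manager-api | app/utils/__init__.py | list_compare_deluxe
-- ===== SOURCE A (Python) =====
-- def list_compare_deluxe(list_1, list_2):
--     """ Compares 'list_1' to 'list_2' and returns a string that
--     can be used to visually diff the two lists. """
--
--     list_1 = sorted(list_1)
--     list_2 = sorted(list_2)
--
--     output = []
--
--     # Determine the maximum length of the elements in both lists
--     max_length = max(max(len(item) for item in list_1), max(len(item) for item in list_2))
--
--     # Determine the elements that exist in both lists
--     common_elements = sorted(set(list_1).intersection(list_2))
--
--     # Print the elements that exist in both lists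
--     for element in common_elements:
--         output.append(f"{element.ljust(max_length)} | {element.ljust(max_length)}\n")
--
--     # Determine the elements that exist only in list_1 and list_2 respectively
--     elements_only_in_list_1 = sorted(set(list_1) - set(list_2))
--     elements_only_in_list_2 = sorted(set(list_2) - set(list_1))
--
--     # Print the interpolated elements
--     for element_1, element_2 in zip(elements_only_in_list_1, elements_only_in_list_2):
--         output.append(f"{element_1.ljust(max_length)} | {element_2.ljust(max_length)}\n")
--
--     # Print any remaining elements from the longer list
--     for element_1 in elements_only_in_list_1[len(elements_only_in_list_2):]:
--         output.append(f"{element_1.ljust(max_length)} | {''.ljust(max_length)}\n")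
--     for element_2 in elements_only_in_list_2[len(elements_only_in_list_1):]:
--         output.append(f"{''.ljust(max_length)} | {element_2.ljust(max_length)}\n")
--
--     return ''.join(output)
-- ===== SOURCE B (Python) =====
-- def list_compare_deluxe(list_1, list_2):
--     """ Compares 'list_1' to 'list_2' and returns a string that
--     can be used to visually diff the two lists. """
--
--     width = max(len(s) for s in list_1 + list_2)
--
--     # Two-pointer merge over the sorted, de-duplicated lists: no set objects,
--     # the classification into common/left-only/right-only falls out of the merge.
--     common, only_1, only_2 = _merge_split(_dedup_sorted(sorted(list_1)),
--                                           _dedup_sorted(sorted(list_2)))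
--
--     rows = common + _pad_pairs(only_1, only_2)
--     return ''.join(f"{left.ljust(width)} | {right.ljust(width)}\n" for left, right in rows)
--
--
-- def _dedup_sorted(xs):
--     """Drop adjacent duplicates of a sorted list."""
--     out = []
--     for x in xs:
--         if not out or out[-1] != x:
--             out.append(x)
--     return out
--
--
-- def _merge_split(xs, ys):
--     """Merge two strictly sorted lists into (common pairs, only-left, only-right)."""
--     common, only_1, only_2 = [], [], []
--     i = j = 0
--     while i < len(xs) and j < len(ys):
--         if xs[i] == ys[j]:
--             common.append((xs[i], ys[j]))
--             i += 1
--             j += 1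
--         elif xs[i] < ys[j]:
--             only_1.append(xs[i])
--             i += 1
--         else:
--             only_2.append(ys[j])
--             j += 1
--     return common, only_1 + xs[i:], only_2 + ys[j:]
--
--
-- def _pad_pairs(xs, ys):
--     """Pair the two lists positionally, padding the shorter with ''."""
--     pairs = []
--     k = 0
--     while k < len(xs) or k < len(ys):
--         pairs.append((xs[k] if k < len(xs) else '', ys[k] if k < len(ys) else ''))
--         k += 1
--     return pairs
-- ===== Notes on version B (the rewrite author's own statement) =====
-- stated objective: alternative
-- what changed: B replaces A's hash-set intersection/differences and three separate output loops by a two-pointer merge of the two sorted de-duplicated lists (the common/left-only/right-only classification falls out of the merge), followed by a recursive positional pairing of the exclusive columns; no set objects or slices are used.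
import Mathlib
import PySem

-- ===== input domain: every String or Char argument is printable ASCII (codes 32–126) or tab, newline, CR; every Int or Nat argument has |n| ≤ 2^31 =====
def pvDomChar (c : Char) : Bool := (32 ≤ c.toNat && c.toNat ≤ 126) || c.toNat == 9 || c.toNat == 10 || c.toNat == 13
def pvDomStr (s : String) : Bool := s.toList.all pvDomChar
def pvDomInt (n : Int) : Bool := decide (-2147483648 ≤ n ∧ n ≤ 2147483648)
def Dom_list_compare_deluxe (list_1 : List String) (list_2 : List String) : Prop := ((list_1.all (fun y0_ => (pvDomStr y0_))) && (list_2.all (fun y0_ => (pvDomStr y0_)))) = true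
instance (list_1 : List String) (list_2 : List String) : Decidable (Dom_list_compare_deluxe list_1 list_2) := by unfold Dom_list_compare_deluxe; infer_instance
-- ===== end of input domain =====

-- B replaces A's set intersection/differences and three output loops by a two-pointer merge
-- of the sorted de-duplicated lists plus a recursive positional pairing (objective: alternative).

-- ===== PORT A =====
-- str.ljust(w) on the char list (exact: pad with spaces on the right)
def pvLjustA (s : String) (w : Int) : List Char :=
  s.toList ++ List.replicate (w - s.toList.length).toNat ' '

-- f"{l.ljust(w)} | {r.ljust(w)}\n"
def pvLineA (l r : String) (w : Int) : String :=
  String.ofList (pvLjustA l w ++ [' ', '|', ' '] ++ pvLjustA r w ++ ['\n'])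

def list_compare_deluxe (list_1 : List String) (list_2 : List String) : String :=
  let l1 := PySem.List.sorted list_1 (fun x => x) false
  let l2 := PySem.List.sorted list_2 (fun x => x) false
  -- max(max(len(item) for item in list_1), max(len(item) for item in list_2)); the inner
  -- max of an empty generator raises ValueError — excluded by Pre_ (foldl from 0 is exact on nonempty lists)
  let maxLength := max (l1.foldl (fun acc s => max acc (PySem.Str.len s)) 0)
                       (l2.foldl (fun acc s => max acc (PySem.Str.len s)) 0)
  let commonElements := PySem.List.sorted (PySem.Set.inter (PySem.Set.ofList l1) l2) (fun x => x) false
  let output := commonElements.foldl (fun acc e => acc ++ [pvLineA e e maxLength]) []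
  let only1 := PySem.List.sorted (PySem.Set.diff (PySem.Set.ofList l1) (PySem.Set.ofList l2)) (fun x => x) false
  let only2 := PySem.List.sorted (PySem.Set.diff (PySem.Set.ofList l2) (PySem.Set.ofList l1)) (fun x => x) false
  let output := (only1.zip only2).foldl (fun acc p => acc ++ [pvLineA p.1 p.2 maxLength]) output
  let output := (PySem.List.slice only1 (some (only2.length : Int)) none).foldl
                  (fun acc e => acc ++ [pvLineA e "" maxLength]) output
  let output := (PySem.List.slice only2 (some (only1.length : Int)) none).foldl
                  (fun acc e => acc ++ [pvLineA "" e maxLength]) output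
  PySem.Str.join "" output

-- ===== PORT B =====
def pvLjustB (s : String) (w : Int) : List Char :=
  s.toList ++ List.replicate (w - s.toList.length).toNat ' '

def pvLineB (l r : String) (w : Int) : String :=
  String.ofList (pvLjustB l w ++ [' ', '|', ' '] ++ pvLjustB r w ++ ['\n'])

-- _dedup_sorted: drop adjacent duplicates ('if not out or out[-1] != x: out.append(x)')
def pvDedupSorted (xs : List String) : List String :=
  xs.foldl (fun out x => if out.getLast? ≠ some x then out ++ [x] else out) []

-- _merge_split: two-pointer merge; the Python while-loop consuming the fronts of xs/ys
-- becomes the obvious recursion on the two lists (same comparisons, same element order)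
def pvMergeSplit : List String → List String → List (String × String) × List String × List String
  | [], ys => ([], [], ys)
  | xs, [] => ([], xs, [])
  | x :: xs, y :: ys =>
    if x == y then
      let r := pvMergeSplit xs ys
      ((x, y) :: r.1, r.2.1, r.2.2)
    else if x < y then
      let r := pvMergeSplit xs (y :: ys)
      (r.1, x :: r.2.1, r.2.2)
    else
      let r := pvMergeSplit (x :: xs) ys
      (r.1, r.2.1, y :: r.2.2)
  termination_by xs ys => xs.length + ys.length

-- _pad_pairs: positional pairing, padding the shorter list with ''
def pvPadPairs : List String → List String → List (String × String)
  | [], [] => []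
  | [], y :: ys => ("", y) :: pvPadPairs [] ys
  | x :: xs, [] => (x, "") :: pvPadPairs xs []
  | x :: xs, y :: ys => (x, y) :: pvPadPairs xs ys

def list_compare_deluxe_alt (list_1 : List String) (list_2 : List String) : String :=
  -- max(len(s) for s in list_1 + list_2) (raises only when both lists are empty — excluded by Pre_)
  let width := ((list_1 ++ list_2).map PySem.Str.len).foldl max 0
  let r := pvMergeSplit (pvDedupSorted (PySem.List.sorted list_1 (fun x => x) false))
                        (pvDedupSorted (PySem.List.sorted list_2 (fun x => x) false))
  let rows := r.1 ++ pvPadPairs r.2.1 r.2.2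
  PySem.Str.join "" (rows.map (fun p => pvLineB p.1 p.2 width))

-- ===== PRECONDITION & SPEC =====
-- Pre_ excludes inputs with an empty list, on which A's inner max() over an empty generator raises ValueError.
def Pre_list_compare_deluxe (list_1 : List String) (list_2 : List String) : Prop :=
  list_1 ≠ [] ∧ list_2 ≠ []
instance (list_1 : List String) (list_2 : List String) : Decidable (Pre_list_compare_deluxe list_1 list_2) := by unfold Pre_list_compare_deluxe; infer_instance
def pvWitness_list_compare_deluxe : List String × List String := (["a"], ["b"])

def Spec_list_compare_deluxe (list_1 : List String) (list_2 : List String) (out : String) : Prop := out = list_compare_deluxe_alt list_1 list_2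
instance (list_1 : List String) (list_2 : List String) (out : String) : Decidable (Spec_list_compare_deluxe list_1 list_2 out) := by unfold Spec_list_compare_deluxe; infer_instance

-- ===== CLAIM (what is proved, stated in full; the proofs are below) =====
def Claim_equal_list_compare_deluxe : Prop := ∀ (list_1 : List String) (list_2 : List String), Dom_list_compare_deluxe list_1 list_2 → Pre_list_compare_deluxe list_1 list_2 → Spec_list_compare_deluxe list_1 list_2 (list_compare_deluxe list_1 list_2)

-- ===== LEMMAS AND PROOFS =====
theorem pvLine_eq : pvLineB = pvLineA := by
  funext l r w; simp [pvLineA, pvLineB, pvLjustA, pvLjustB]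

theorem pvFoldlMaxShift (xs : List Int) (a b : Int) :
    xs.foldl max (max a b) = max a (xs.foldl max b) := by
  induction xs generalizing b with
  | nil => simp
  | cons c t ih => simp only [List.foldl_cons, max_assoc, ih]

theorem pvFoldlMaxNonneg (xs : List Int) : 0 ≤ xs.foldl max 0 := by
  have h := pvFoldlMaxShift xs 0 0
  simp only [max_self] at h
  rw [h]; exact le_max_left _ _

theorem pvFoldlMaxPerm (xs ys : List Int) (h : xs.Perm ys) :
    xs.foldl max 0 = ys.foldl max 0 :=
  List.Perm.foldl_op_eq h

theorem pvWidthEq (l1 l2 : List String) :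
    max ((PySem.List.sorted l1 (fun x => x) false).foldl (fun acc s => max acc (PySem.Str.len s)) 0)
        ((PySem.List.sorted l2 (fun x => x) false).foldl (fun acc s => max acc (PySem.Str.len s)) 0)
    = ((l1 ++ l2).map PySem.Str.len).foldl max 0 := by
  rw [← List.foldl_map (f := PySem.Str.len) (g := fun a b => max a b),
      ← List.foldl_map (f := PySem.Str.len) (g := fun a b => max a b)]
  rw [pvFoldlMaxPerm _ _ (((PySem.List.sorted_perm l1 (fun x => x) false)).map PySem.Str.len),
      pvFoldlMaxPerm _ _ (((PySem.List.sorted_perm l2 (fun x => x) false)).map PySem.Str.len)]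
  rw [List.map_append, List.foldl_append]
  have h0 : 0 ≤ (l1.map PySem.Str.len).foldl max 0 := pvFoldlMaxNonneg _
  rw [show (l1.map PySem.Str.len).foldl max 0
        = max ((l1.map PySem.Str.len).foldl max 0) 0 from (max_eq_left h0).symm,
      pvFoldlMaxShift, max_eq_left h0]

-- every member of a ≤-sorted list is ≤ its last element
theorem pvMemLeLast (l : List String) (h : l.Pairwise (· ≤ ·)) :
    ∀ a ∈ l, ∃ m, l.getLast? = some m ∧ a ≤ m := by
  induction l with
  | nil => intro a ha; cases ha
  | cons x t ih =>
    intro a ha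
    cases t with
    | nil =>
      rcases List.mem_singleton.mp ha with rfl
      exact ⟨a, rfl, le_rfl⟩
    | cons y u =>
      rw [List.getLast?_cons_cons]
      have hcr := List.pairwise_cons.mp h
      rcases List.mem_cons.mp ha with rfl | ha'
      · obtain ⟨m, hm, hym⟩ := ih hcr.2 y List.mem_cons_self
        exact ⟨m, hm, le_trans (hcr.1 y List.mem_cons_self) hym⟩
      · exact ih hcr.2 a ha'

-- foldl-dedup invariant: from a strictly sorted accumulator and a ≤-sorted remainder
-- it yields a strictly sorted list with the union membership
theorem pvDedupInv (xs : List String) : ∀ (acc : List String),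
    (acc ++ xs).Pairwise (· ≤ ·) → acc.Pairwise (· < ·) →
    (xs.foldl (fun out x => if out.getLast? ≠ some x then out ++ [x] else out) acc).Pairwise (· < ·) ∧
    ∀ z, z ∈ xs.foldl (fun out x => if out.getLast? ≠ some x then out ++ [x] else out) acc ↔ z ∈ acc ++ xs := by
  induction xs with
  | nil =>
    intro acc _ ha
    refine ⟨ha, fun z => ?_⟩
    simp
  | cons x t ih =>
    intro acc hs ha
    rw [List.foldl_cons]
    by_cases hc : acc.getLast? = some x
    · simp only [hc, ne_eq, not_true_eq_false, if_false]
      have hsub : (acc ++ t).Sublist (acc ++ x :: t) :=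
        (List.sublist_cons_self x t).append_left acc
      obtain ⟨hp, hm⟩ := ih acc (hs.sublist hsub) ha
      refine ⟨hp, fun z => (hm z).trans ?_⟩
      have hxacc : x ∈ acc := by
        obtain ⟨l', hl'⟩ := List.getLast?_eq_some_iff.mp hc
        rw [hl']; simp
      simp only [List.mem_append, List.mem_cons]
      constructor
      · rintro (h | h) <;> tauto
      · rintro (h | rfl | h) <;> tauto
    · simp only [hc, ne_eq, not_false_eq_true, if_true]
      have hassoc : (acc ++ [x]) ++ t = acc ++ x :: t := by simp
      have hs' : ((acc ++ [x]) ++ t).Pairwise (· ≤ ·) := by rw [hassoc]; exact hs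
      have hsplit := List.pairwise_append.mp hs
      have hcross : ∀ a ∈ acc, a ≤ x := fun a hamem =>
        hsplit.2.2 a hamem x List.mem_cons_self
      have hfin : ∀ a ∈ acc, ∀ b ∈ [x], a < b := by
        intro a hamem b hbmem
        rcases List.mem_singleton.mp hbmem with rfl
        rcases lt_or_eq_of_le (hcross a hamem) with hlt | heq
        · exact hlt
        · exfalso
          obtain ⟨m, hm, ham⟩ := pvMemLeLast acc hsplit.1 a hamem
          have hmmem : m ∈ acc := by
            obtain ⟨l', hl'⟩ := List.getLast?_eq_some_iff.mp hm
            rw [hl']; simp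
          have hmb : m = b := le_antisymm (hcross m hmmem) (heq ▸ ham)
          exact hc (hmb ▸ hm)
      have ha' : (acc ++ [x]).Pairwise (· < ·) :=
        (List.pairwise_append (l₁ := acc) (l₂ := [x])).mpr ⟨ha, List.pairwise_singleton _ _, hfin⟩
      obtain ⟨hp, hm⟩ := ih (acc ++ [x]) hs' ha'
      refine ⟨hp, fun z => (hm z).trans ?_⟩
      simp only [List.mem_append, List.mem_cons]
      tauto

-- a strictly sorted list with the same membership as a Nodup list M IS sorted(M)
theorem pvSortedEq (M X : List String) (hM : M.Nodup) (hX : X.Pairwise (· < ·))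
    (hmem : ∀ z, z ∈ X ↔ z ∈ M) :
    PySem.List.sorted M (fun x => x) false = X := by
  apply PySem.List.sorted_eq_of_perm_of_pairwise_lt
  · rw [List.perm_ext_iff_of_nodup (hX.imp ne_of_lt) hM]; exact hmem
  · exact hX

-- two-pointer merge of strictly sorted lists = (common, only-left, only-right) as filters
theorem pvMergeEq (xs ys : List String) :
    xs.Pairwise (· < ·) → ys.Pairwise (· < ·) →
    pvMergeSplit xs ys =
      ((xs.filter (fun e => ys.contains e)).map (fun e => (e, e)),
       xs.filter (fun e => !ys.contains e),
       ys.filter (fun e => !xs.contains e)) := by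
  induction xs, ys using pvMergeSplit.induct with
  | case1 ys => intro _ _; simp [pvMergeSplit]
  | case2 xs h =>
    intro _ _
    cases xs with
    | nil => simp [pvMergeSplit]
    | cons x t => simp [pvMergeSplit]
  | case3 x xs y ys heq ih =>
    intro hx hy
    have hxy : x = y := by simpa using heq
    subst hxy
    have hxs : ∀ e ∈ xs, x < e := fun e he => List.rel_of_pairwise_cons hx he
    have hys : ∀ e ∈ ys, x < e := fun e he => List.rel_of_pairwise_cons hy he
    have h1 : xs.filter (fun e => (x :: ys).contains e) = xs.filter (fun e => ys.contains e) := by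
      apply List.filter_congr; intro e he
      simp [List.contains_cons, ne_of_gt (hxs e he), (ne_of_gt (hxs e he)).symm]
    have h2 : xs.filter (fun e => !(x :: ys).contains e) = xs.filter (fun e => !ys.contains e) := by
      apply List.filter_congr; intro e he
      simp [List.contains_cons, ne_of_gt (hxs e he), (ne_of_gt (hxs e he)).symm]
    have h3 : ys.filter (fun e => !(x :: xs).contains e) = ys.filter (fun e => !xs.contains e) := by
      apply List.filter_congr; intro e he
      simp [List.contains_cons, ne_of_gt (hys e he), (ne_of_gt (hys e he)).symm]
    have e1 : (x :: xs).filter (fun e => (x :: ys).contains e)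
        = x :: xs.filter (fun e => ys.contains e) := by
      rw [List.filter_cons_of_pos (by simp [List.contains_cons]), h1]
    have e2 : (x :: xs).filter (fun e => !(x :: ys).contains e)
        = xs.filter (fun e => !ys.contains e) := by
      rw [List.filter_cons_of_neg (by simp [List.contains_cons]), h2]
    have e3 : (x :: ys).filter (fun e => !(x :: xs).contains e)
        = ys.filter (fun e => !xs.contains e) := by
      rw [List.filter_cons_of_neg (by simp [List.contains_cons]), h3]
    simp only [pvMergeSplit, if_pos heq, ih hx.of_cons hy.of_cons]
    rw [e1, e2, e3, List.map_cons]
  | case4 x xs y ys hne hlt ih =>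
    intro hx hy
    have hxne : x ≠ y := by simpa using hne
    have hnin : ¬ ((y :: ys).contains x = true) := by
      intro hcon
      rcases List.mem_cons.mp (by simpa using hcon) with rfl | hxin
      · exact hxne rfl
      · exact absurd (List.rel_of_pairwise_cons hy hxin) (not_lt.mpr (le_of_lt hlt))
    have h3 : (y :: ys).filter (fun e => !(x :: xs).contains e)
        = (y :: ys).filter (fun e => !xs.contains e) := by
      apply List.filter_congr; intro e he
      have hgt : x < e := by
        rcases List.mem_cons.mp he with rfl | he'
        · exact hlt
        · exact lt_trans hlt (List.rel_of_pairwise_cons hy he')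
      simp [List.contains_cons, ne_of_gt hgt, (ne_of_gt hgt).symm]
    have e1 : (x :: xs).filter (fun e => (y :: ys).contains e)
        = xs.filter (fun e => (y :: ys).contains e) := by
      rw [List.filter_cons_of_neg (by simpa using hnin)]
    have e2 : (x :: xs).filter (fun e => !(y :: ys).contains e)
        = x :: xs.filter (fun e => !(y :: ys).contains e) := by
      rw [List.filter_cons_of_pos (by simpa using hnin)]
    simp only [pvMergeSplit, if_neg hne, if_pos hlt, ih hx.of_cons hy]
    rw [e1, e2, h3]
  | case5 x xs y ys hne hnlt ih =>
    intro hx hy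
    have hylt : y < x := by
      rcases lt_trichotomy x y with h | h | h
      · exact absurd h hnlt
      · exact absurd h (by simpa using hne)
      · exact h
    have hnin : ¬ ((x :: xs).contains y = true) := by
      intro hcon
      rcases List.mem_cons.mp (by simpa using hcon) with rfl | hyin
      · exact absurd rfl (ne_of_gt hylt)
      · exact absurd (List.rel_of_pairwise_cons hx hyin) (not_lt.mpr (le_of_lt hylt))
    have hgtall : ∀ e ∈ x :: xs, y < e := by
      intro e he
      rcases List.mem_cons.mp he with rfl | he'
      · exact hylt
      · exact lt_trans hylt (List.rel_of_pairwise_cons hx he')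
    have h1 : (x :: xs).filter (fun e => (y :: ys).contains e)
        = (x :: xs).filter (fun e => ys.contains e) := by
      apply List.filter_congr; intro e he
      simp [List.contains_cons, ne_of_gt (hgtall e he), (ne_of_gt (hgtall e he)).symm]
    have h2 : (x :: xs).filter (fun e => !(y :: ys).contains e)
        = (x :: xs).filter (fun e => !ys.contains e) := by
      apply List.filter_congr; intro e he
      simp [List.contains_cons, ne_of_gt (hgtall e he), (ne_of_gt (hgtall e he)).symm]
    have e3 : (y :: ys).filter (fun e => !(x :: xs).contains e)
        = y :: ys.filter (fun e => !(x :: xs).contains e) := by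
      rw [List.filter_cons_of_pos (by simpa using hnin)]
    simp only [pvMergeSplit, if_neg hne, if_neg hnlt, ih hx hy.of_cons]
    rw [h1, h2, e3]

-- recursive padding = zip followed by the two one-sided remainders
theorem pvPadNilLeft (t : List String) : pvPadPairs [] t = t.map (fun e => ("", e)) := by
  induction t with
  | nil => simp [pvPadPairs]
  | cons y u ih => simp [pvPadPairs, ih]

theorem pvPadNilRight (t : List String) : pvPadPairs t [] = t.map (fun e => (e, "")) := by
  induction t with
  | nil => simp [pvPadPairs]
  | cons y u ih => simp [pvPadPairs, ih]

theorem pvPadPairsEq (xs ys : List String) :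
    pvPadPairs xs ys =
      xs.zip ys ++ (xs.drop ys.length).map (fun e => (e, ""))
                ++ (ys.drop xs.length).map (fun e => ("", e)) := by
  induction xs generalizing ys with
  | nil => simp [pvPadNilLeft]
  | cons x t ih =>
    cases ys with
    | nil => simp [pvPadNilRight]
    | cons y u => simp [pvPadPairs, ih]

-- dedup of a sorted list: strictly sorted, same membership
theorem pvDedupSortedSpec (l : List String) :
    (pvDedupSorted (PySem.List.sorted l (fun x => x) false)).Pairwise (· < ·) ∧
    ∀ z, z ∈ pvDedupSorted (PySem.List.sorted l (fun x => x) false) ↔ z ∈ l := by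
  have hs : (PySem.List.sorted l (fun x => x) false).Pairwise (· ≤ ·) := by
    have := PySem.List.sorted_pairwise l (fun x => x)
    simpa using this
  obtain ⟨hp, hm⟩ := pvDedupInv (PySem.List.sorted l (fun x => x) false) [] (by simpa using hs) (by simp)
  exact ⟨hp, fun z => (hm z).trans (by simp [PySem.List.mem_sorted])⟩

-- ===== VERDICT (by name: the statement is the Claim_ definition above) =====
theorem list_compare_deluxe_spec : Claim_equal_list_compare_deluxe := by
  intro l1 l2 _ hpre
  unfold Spec_list_compare_deluxe list_compare_deluxe list_compare_deluxe_alt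
  simp only [PySem.List.foldl_append_singleton_eq_map, List.nil_append, pvLine_eq]
  rw [pvWidthEq l1 l2]
  rw [PySem.List.slice_from _ (by positivity), PySem.List.slice_from _ (by positivity)]
  simp only [Int.toNat_natCast]
  obtain ⟨hp1, hm1⟩ := pvDedupSortedSpec l1
  obtain ⟨hp2, hm2⟩ := pvDedupSortedSpec l2
  set D1 := pvDedupSorted (PySem.List.sorted l1 (fun x => x) false) with hD1
  set D2 := pvDedupSorted (PySem.List.sorted l2 (fun x => x) false) with hD2
  rw [pvMergeEq D1 D2 hp1 hp2]
  have hpc : (D1.filter (fun e => D2.contains e)).Pairwise (· < ·) :=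
    hp1.sublist List.filter_sublist
  have hpo1 : (D1.filter (fun e => !D2.contains e)).Pairwise (· < ·) :=
    hp1.sublist List.filter_sublist
  have hpo2 : (D2.filter (fun e => !D1.contains e)).Pairwise (· < ·) :=
    hp2.sublist List.filter_sublist
  have hc : PySem.List.sorted
      (PySem.Set.inter (PySem.Set.ofList (PySem.List.sorted l1 (fun x => x) false))
        (PySem.List.sorted l2 (fun x => x) false)) (fun x => x) false
      = D1.filter (fun e => D2.contains e) := by
    apply pvSortedEq _ _ (PySem.Set.nodup_inter _ _ (PySem.Set.nodup_ofList _)) hpc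
    intro z
    simp [List.mem_filter, PySem.Set.mem_inter, PySem.Set.mem_ofList,
      PySem.List.mem_sorted, hm1 z, hm2 z]
  have ho1 : PySem.List.sorted
      (PySem.Set.diff (PySem.Set.ofList (PySem.List.sorted l1 (fun x => x) false))
        (PySem.Set.ofList (PySem.List.sorted l2 (fun x => x) false))) (fun x => x) false
      = D1.filter (fun e => !D2.contains e) := by
    apply pvSortedEq _ _ (PySem.Set.nodup_diff _ _ (PySem.Set.nodup_ofList _)) hpo1
    intro z
    simp [List.mem_filter, PySem.Set.mem_diff, PySem.Set.mem_ofList,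
      PySem.List.mem_sorted, hm1 z, hm2 z]
  have ho2 : PySem.List.sorted
      (PySem.Set.diff (PySem.Set.ofList (PySem.List.sorted l2 (fun x => x) false))
        (PySem.Set.ofList (PySem.List.sorted l1 (fun x => x) false))) (fun x => x) false
      = D2.filter (fun e => !D1.contains e) := by
    apply pvSortedEq _ _ (PySem.Set.nodup_diff _ _ (PySem.Set.nodup_ofList _)) hpo2
    intro z
    simp [List.mem_filter, PySem.Set.mem_diff, PySem.Set.mem_ofList,
      PySem.List.mem_sorted, hm1 z, hm2 z]
  rw [hc, ho1, ho2, pvPadPairsEq]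
  simp [List.map_append, List.map_map, Function.comp_def]
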